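-- pv_equiv track=rewrite | github.com/tsuru7/algorithm-study | AtCoder/ABC244/E.py | solve
-- ===== SOURCE A (Python) =====
-- def solve(n,m,k,s,t,x,graph):
--     MOD = 998244353
--     dp = [ [ [0,0] for i in range(n) ] for j in range(k+1) ]
--     s -= 1
--     t -= 1
--     x -= 1
--     dp[0][s] = [1, 0]  # [偶数回(0も含む), 奇数回]
--     for i in range(k):
--         for j in range(n):
--             for v in graph[j]:
--                 if v != x:
--                     dp[i+1][v][0] += dp[i][j][0]
--                     dp[i+1][v][1] += dp[i][j][1]
--                 else:
--                     dp[i+1][v][0] += dp[i][j][1]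
--                     dp[i+1][v][1] += dp[i][j][0]
--                 dp[i+1][v][0] %= MOD
--                 dp[i+1][v][1] %= MOD
--
--     ans=dp[k][t][0]
--     return ans
-- ===== SOURCE B (Python) =====
-- def solve(n, m, k, s, t, x, graph):
--     # Matrix-exponentiation re-implementation: states (vertex, parity of visits to x),
--     # transition matrix raised to the k-th power by repeated squaring mod 998244353.
--     # The matrix is only built when there is at least one step to take.
--     MOD = 998244353
--     d = 2 * n
--
--     def mul(A, B):
--         return [[sum(A[i][l] * B[l][j] for l in range(d)) % MOD
--                  for j in range(d)] for i in range(d)]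
--
--     res = [[1 if i == j else 0 for j in range(d)] for i in range(d)]
--     if k > 0:
--         mat = [[0] * d for _ in range(d)]
--         for j in range(n):
--             for v in graph[j]:
--                 if v != x - 1:
--                     mat[2 * v][2 * j] += 1
--                     mat[2 * v + 1][2 * j + 1] += 1
--                 else:
--                     mat[2 * v][2 * j + 1] += 1
--                     mat[2 * v + 1][2 * j] += 1
--         p = mat
--         e = k
--         while e > 0:
--             if e & 1:
--                 res = mul(res, p)
--             p = mul(p, p)
--             e >>= 1
--     return res[2 * (t - 1)][2 * (s - 1)] % MOD
-- ===== Notes on version B (the rewrite author's own statement) =====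
-- stated objective: alternative
-- what changed: Replaces A's k-round edge-relaxation DP with linear algebra: B builds the fixed 2n x 2n (vertex, parity) transition matrix once (only when k > 0), raises it to the k-th power by binary (repeated-squaring) exponentiation mod 998244353, and reads the (t,even)-(s,even) entry.
import Mathlib
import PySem

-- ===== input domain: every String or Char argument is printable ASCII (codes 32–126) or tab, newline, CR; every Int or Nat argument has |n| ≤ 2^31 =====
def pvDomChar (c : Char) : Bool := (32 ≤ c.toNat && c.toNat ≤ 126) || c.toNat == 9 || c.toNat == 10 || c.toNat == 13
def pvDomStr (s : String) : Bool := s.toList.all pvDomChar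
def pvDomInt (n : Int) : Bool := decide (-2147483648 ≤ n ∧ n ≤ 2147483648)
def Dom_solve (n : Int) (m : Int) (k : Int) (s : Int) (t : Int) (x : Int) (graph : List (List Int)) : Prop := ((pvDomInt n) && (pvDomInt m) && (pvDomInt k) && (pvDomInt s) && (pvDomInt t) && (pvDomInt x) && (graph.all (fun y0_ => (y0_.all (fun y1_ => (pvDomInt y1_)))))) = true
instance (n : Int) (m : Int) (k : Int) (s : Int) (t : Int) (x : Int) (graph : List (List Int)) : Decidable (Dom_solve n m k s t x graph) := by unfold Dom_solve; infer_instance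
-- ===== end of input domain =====

-- B replaces A's step-by-step DP relaxation by binary exponentiation of the fixed
-- (vertex, parity) transition matrix mod 998244353 (objective: alternative algorithm).

-- ===== PORT A =====
-- a fresh all-zero DP row: [[0,0] for i in range(n)], entries as pairs (even, odd)
def pvZerosRow (n : Int) : List (Int × Int) :=
  (PySem.List.pyRange 0 n 1).map (fun _ => ((0 : Int), (0 : Int)))

-- the body of A's 'for j in range(n): for v in graph[j]: …' for one step i → i+1;
-- 'nxt' is the rolling dp[i+1] row (A stores all k+1 layers, but layer i+1 is built
-- from layer i only, so the rolling row is the same computation).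
def pvStepA (n x : Int) (graph : List (List Int)) (row : List (Int × Int)) : List (Int × Int) :=
  (PySem.List.pyRange 0 n 1).foldl (fun nxt j =>
    (PySem.List.pyGetD graph j []).foldl (fun nxt v =>
      let cur := PySem.List.pyGetD nxt v (0, 0)
      let prev := PySem.List.pyGetD row j (0, 0)
      let upd := if v ≠ x then
          (PySem.Int.mod (cur.1 + prev.1) 998244353, PySem.Int.mod (cur.2 + prev.2) 998244353)
        else
          (PySem.Int.mod (cur.1 + prev.2) 998244353, PySem.Int.mod (cur.2 + prev.1) 998244353)
      PySem.List.pySetD nxt v upd) nxt)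
    (pvZerosRow n)

def solve (n : Int) (m : Int) (k : Int) (s : Int) (t : Int) (x : Int) (graph : List (List Int)) : Int :=
  let s1 := s - 1
  let t1 := t - 1
  let x1 := x - 1
  let row0 := PySem.List.pySetD (pvZerosRow n) s1 (1, 0)   -- dp[0][s] = [1, 0]
  let fin := (PySem.List.pyRange 0 k 1).foldl (fun row _ => pvStepA n x1 graph row) row0
  (PySem.List.pyGetD fin t1 (0, 0)).1

-- ===== PORT B =====
-- mat[i][j] += 1
def pvBump (mat : List (List Int)) (i j : Int) : List (List Int) :=
  let row := PySem.List.pyGetD mat i []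
  PySem.List.pySetD mat i (PySem.List.pySetD row j (PySem.List.pyGetD row j 0 + 1))

-- the (vertex, parity) transition matrix, built edge by edge
def pvBuildMat (n x : Int) (graph : List (List Int)) : List (List Int) :=
  (PySem.List.pyRange 0 n 1).foldl (fun mat j =>
    (PySem.List.pyGetD graph j []).foldl (fun mat v =>
      if v ≠ x - 1 then pvBump (pvBump mat (2*v) (2*j)) (2*v+1) (2*j+1)
      else pvBump (pvBump mat (2*v) (2*j+1)) (2*v+1) (2*j)) mat)
    ((PySem.List.pyRange 0 (2*n) 1).map (fun _ => (PySem.List.pyRange 0 (2*n) 1).map (fun _ => (0 : Int))))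

-- d×d matrix product mod 998244353
def pvMul (d : Int) (A B : List (List Int)) : List (List Int) :=
  (PySem.List.pyRange 0 d 1).map (fun i =>
    (PySem.List.pyRange 0 d 1).map (fun j =>
      PySem.Int.mod ((PySem.List.pyRange 0 d 1).foldl (fun acc l =>
        acc + PySem.List.pyGetD (PySem.List.pyGetD A i []) l 0 *
              PySem.List.pyGetD (PySem.List.pyGetD B l []) j 0) 0) 998244353))

-- binary exponentiation: Python's 'while e > 0: if e & 1: res = res@p; p = p@p; e >>= 1'
def pvPow (d : Int) (res p : List (List Int)) (e : Nat) : List (List Int) :=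
  if e = 0 then res
  else pvPow d (if e % 2 = 1 then pvMul d res p else res) (pvMul d p p) (e / 2)
termination_by e
decreasing_by omega

def solve_alt (n : Int) (m : Int) (k : Int) (s : Int) (t : Int) (x : Int) (graph : List (List Int)) : Int :=
  let d := 2 * n
  let idm := (PySem.List.pyRange 0 d 1).map (fun i =>
    (PySem.List.pyRange 0 d 1).map (fun j => if i = j then (1 : Int) else 0))
  let r := if 0 < k then pvPow d idm (pvBuildMat n x graph) k.toNat else idm
  PySem.Int.mod (PySem.List.pyGetD (PySem.List.pyGetD r (2*(t-1)) []) (2*(s-1)) 0) 998244353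

-- ===== PRECONDITION & SPEC =====
-- Pre_ requires k ≥ 0, s and t in Python's accepted index range [1-n, n], and — when
-- k ≥ 1, so that the graph is actually read — an adjacency list with at least n rows whose
-- vertices lie in Python's accepted index range [-n, n) (negative ones wrap as in Python);
-- on every input outside Pre_, A raises IndexError.
def Pre_solve (n : Int) (m : Int) (k : Int) (s : Int) (t : Int) (x : Int) (graph : List (List Int)) : Prop :=
  1 ≤ n ∧ 0 ≤ k ∧ 1 - n ≤ s ∧ s ≤ n ∧ 1 - n ≤ t ∧ t ≤ n ∧
  (k = 0 ∨ (n.toNat ≤ graph.length ∧ ∀ row ∈ graph.take n.toNat, ∀ v ∈ row, -n ≤ v ∧ v < n))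
instance (n : Int) (m : Int) (k : Int) (s : Int) (t : Int) (x : Int) (graph : List (List Int)) : Decidable (Pre_solve n m k s t x graph) := by unfold Pre_solve; infer_instance

def pvWitness_solve : Int × Int × Int × Int × Int × Int × List (List Int) :=
  (3, 4, 2, 1, 3, 2, [[1, 2], [0, 2], [0, 1]])

def Spec_solve (n : Int) (m : Int) (k : Int) (s : Int) (t : Int) (x : Int) (graph : List (List Int)) (out : Int) : Prop := out = solve_alt n m k s t x graph
instance (n : Int) (m : Int) (k : Int) (s : Int) (t : Int) (x : Int) (graph : List (List Int)) (out : Int) : Decidable (Spec_solve n m k s t x graph out) := by unfold Spec_solve; infer_instance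

-- ===== CLAIM (what is proved, stated in full; the proofs are below) =====
def Claim_equal_solve : Prop := ∀ (n : Int) (m : Int) (k : Int) (s : Int) (t : Int) (x : Int) (graph : List (List Int)), Dom_solve n m k s t x graph → Pre_solve n m k s t x graph → Spec_solve n m k s t x graph (solve n m k s t x graph)

-- ===== LEMMAS AND PROOFS =====

-- entries of a list-of-lists matrix, read in ZMod 998244353
def pvM (D : ℕ) (A : List (List Int)) : Matrix (Fin D) (Fin D) (ZMod 998244353) :=
  Matrix.of fun i j => (((A.getD (i : ℕ) []).getD (j : ℕ) 0 : Int) : ZMod 998244353)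

-- a DP row of (even, odd) pairs, read as a length-2N vector in ZMod 998244353
def pvV (D : ℕ) (row : List (Int × Int)) : Fin D → ZMod 998244353 := fun i =>
  if (i : ℕ) % 2 = 0 then (((row.getD ((i : ℕ) / 2) (0, 0)).1 : Int) : ZMod 998244353)
  else (((row.getD ((i : ℕ) / 2) (0, 0)).2 : Int) : ZMod 998244353)

theorem pv_castmod (a : Int) :
    ((PySem.Int.mod a 998244353 : Int) : ZMod 998244353) = (a : ZMod 998244353) := by
  rw [PySem.Int.mod_eq_emod_of_pos (by norm_num)]
  have h : a % (998244353 : Int) = a - 998244353 * (a / 998244353) := by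
    have := Int.ediv_add_emod a 998244353; omega
  rw [h]
  push_cast
  have h0 : ((998244353 : ZMod 998244353)) = 0 := by
    exact_mod_cast ZMod.natCast_self 998244353
  rw [h0]; ring

theorem pv_entry_map {α : Type} (D : ℕ) (f : Int → α) (d : α) (i : ℕ) (hi : i < D) :
    ((PySem.List.pyRange 0 (D : Int) 1).map f).getD i d = f (i : Int) := by
  rw [PySem.List.pyRange_zero_natCast, List.map_map]
  exact PySem.List.getD_map_range _ _ _ _ hi

theorem pv_cast_sum_fin (D : ℕ) (f : ℕ → Int) :
    ((((List.range D).map f).sum : Int) : ZMod 998244353) = ∑ i : Fin D, ((f (i : ℕ) : Int) : ZMod 998244353) := by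
  rw [Fin.sum_univ_eq_sum_range (fun i => ((f i : Int) : ZMod 998244353)) D]
  induction D with
  | zero => simp
  | succ d ih =>
    rw [List.range_succ, Finset.sum_range_succ, List.map_append, List.sum_append, ← ih]
    push_cast
    simp

theorem pv_mulM (D : ℕ) (A B : List (List Int)) :
    pvM D (pvMul (D : Int) A B) = pvM D A * pvM D B := by
  ext i j
  unfold pvM pvMul
  rw [Matrix.mul_apply]
  simp only [Matrix.of_apply]
  rw [pv_entry_map _ _ _ _ i.isLt, pv_entry_map _ _ _ _ j.isLt, pv_castmod,
    PySem.List.pyRange_zero_natCast, List.foldl_map, PySem.List.foldl_add, zero_add,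
    pv_cast_sum_fin]
  apply Finset.sum_congr rfl
  intro l _
  simp [PySem.List.pyGetD_natCast]

theorem pv_powM (D : ℕ) (e : Nat) (R P : List (List Int)) :
    pvM D (pvPow (D : Int) R P e) = pvM D R * (pvM D P) ^ e := by
  induction e using Nat.strong_induction_on generalizing R P with
  | _ e ih =>
    by_cases he : e = 0
    · subst he; rw [pvPow]; simp
    · rw [pvPow, if_neg he]
      rw [ih (e / 2) (by omega), pv_mulM]
      by_cases hodd : e % 2 = 1
      · rw [if_pos hodd, pv_mulM, mul_assoc, ← pow_two, ← pow_mul, ← pow_succ',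
          (by omega : 2 * (e / 2) + 1 = e)]
      · rw [if_neg hodd, ← pow_two, ← pow_mul, (by omega : 2 * (e / 2) = e)]

theorem pv_idM (D : ℕ) :
    pvM D ((PySem.List.pyRange 0 (D : Int) 1).map (fun i =>
      (PySem.List.pyRange 0 (D : Int) 1).map (fun j => if i = j then (1 : Int) else 0))) = 1 := by
  ext i j
  unfold pvM
  simp only [Matrix.of_apply]
  rw [pv_entry_map _ _ _ _ i.isLt, pv_entry_map _ _ _ _ j.isLt, Matrix.one_apply]
  by_cases h : i = j
  · simp [h]
  · have : ((i : ℕ) : Int) ≠ ((j : ℕ) : Int) := by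
      simpa [Fin.ext_iff] using h
    simp [this, h]

-- Python index normalization (negative indices wrap)
def pvIdx (len : ℕ) (i : Int) : ℕ := if 0 ≤ i then i.toNat else len - (-i).toNat

theorem pvIdx_lt (len : ℕ) (i : Int) (h1 : i < len) (hl : 1 ≤ len) :
    pvIdx len i < len := by unfold pvIdx; split_ifs <;> omega

theorem pv_pyIdx (len : ℕ) (i : Int) (h0 : -(len : Int) ≤ i) (h1 : i < len) :
    PySem.List.pyIdx? len i = some (pvIdx len i) := by
  unfold PySem.List.pyIdx? pvIdx
  split_ifs <;> first | rfl | omega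

theorem pv_pySetD {α : Type} (xs : List α) (i : Int) (v : α)
    (h0 : -(xs.length : Int) ≤ i) (h1 : i < xs.length) :
    PySem.List.pySetD xs i v = xs.set (pvIdx xs.length i) v := by
  unfold PySem.List.pySetD PySem.List.pySet?
  rw [pv_pyIdx _ _ h0 h1]
  rfl

theorem pv_pyGetD {α : Type} (xs : List α) (i : Int) (d : α)
    (h0 : -(xs.length : Int) ≤ i) (h1 : i < xs.length) :
    PySem.List.pyGetD xs i d = xs.getD (pvIdx xs.length i) d := by
  unfold PySem.List.pyGetD PySem.List.pyGet?
  rw [pv_pyIdx _ _ h0 h1]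
  rfl

theorem pv_mem_pySetD {α : Type} (q : α) (xs : List α) (i : Int) (v : α)
    (h : q ∈ PySem.List.pySetD xs i v) : q ∈ xs ∨ q = v := by
  unfold PySem.List.pySetD PySem.List.pySet? at h
  cases hi : PySem.List.pyIdx? xs.length i with
  | none => rw [hi] at h; simp at h; exact Or.inl h
  | some kk =>
    rw [hi] at h; simp at h
    rcases List.mem_or_eq_of_mem_set h with h' | h'
    · exact Or.inl h'
    · exact Or.inr h'

-- the edge list (source j, target v) in A's traversal order
def pvEdges (N : ℕ) (graph : List (List Int)) : List (ℕ × Int) :=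
  (List.range N).flatMap (fun j => (graph.getD j []).map (fun v => (j, v)))

-- one edge's update of A's rolling dp[i+1] row
def pvUpdA (x1 : Int) (row nxt : List (Int × Int)) (e : ℕ × Int) : List (Int × Int) :=
  let cur := PySem.List.pyGetD nxt e.2 (0, 0)
  let prev := row.getD e.1 (0, 0)
  let upd := if e.2 ≠ x1 then
      (PySem.Int.mod (cur.1 + prev.1) 998244353, PySem.Int.mod (cur.2 + prev.2) 998244353)
    else
      (PySem.Int.mod (cur.1 + prev.2) 998244353, PySem.Int.mod (cur.2 + prev.1) 998244353)
  PySem.List.pySetD nxt e.2 upd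

theorem pvStepA_eq (n x1 : Int) (hn : 0 ≤ n) (graph : List (List Int)) (row : List (Int × Int)) :
    pvStepA n x1 graph row
      = (pvEdges n.toNat graph).foldl (pvUpdA x1 row) (pvZerosRow n) := by
  unfold pvStepA pvEdges pvUpdA
  conv_lhs => rw [show n = ((n.toNat : ℕ) : Int) from (Int.toNat_of_nonneg hn).symm,
    PySem.List.pyRange_zero_natCast]
  rw [List.foldl_map, List.foldl_flatMap]
  simp only [List.foldl_map, PySem.List.pyGetD_natCast]
  rw [show ((n.toNat : ℕ) : Int) = n from Int.toNat_of_nonneg hn]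

-- contribution that an edge (source j, raw target v) makes to component c of its target
def pvF (x1 : Int) (row : List (Int × Int)) (c : ℕ) (v : Int) (j : ℕ) : ZMod 998244353 :=
  if v ≠ x1 then
    (if c = 0 then (((row.getD j (0, 0)).1 : Int) : ZMod 998244353)
     else (((row.getD j (0, 0)).2 : Int) : ZMod 998244353))
  else
    (if c = 0 then (((row.getD j (0, 0)).2 : Int) : ZMod 998244353)
     else (((row.getD j (0, 0)).1 : Int) : ZMod 998244353))

theorem pv_scatterA (x1 : Int) (row : List (Int × Int)) (N : ℕ) (es : List (ℕ × Int))
    (hes : ∀ e ∈ es, -(N : Int) ≤ e.2 ∧ e.2 < (N : Int)) :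
    ∀ nxt : List (Int × Int), nxt.length = N → ∀ w : ℕ, w < N →
    ((((es.foldl (pvUpdA x1 row) nxt).getD w (0, 0)).1 : Int) : ZMod 998244353)
        = (((nxt.getD w (0, 0)).1 : Int) : ZMod 998244353)
          + ((es.filter (fun e => pvIdx N e.2 = w)).map (fun e => pvF x1 row 0 e.2 e.1)).sum
    ∧ ((((es.foldl (pvUpdA x1 row) nxt).getD w (0, 0)).2 : Int) : ZMod 998244353)
        = (((nxt.getD w (0, 0)).2 : Int) : ZMod 998244353)
          + ((es.filter (fun e => pvIdx N e.2 = w)).map (fun e => pvF x1 row 1 e.2 e.1)).sum := by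
  induction es with
  | nil => simp
  | cons e es ih =>
    intro nxt hlen w hw
    obtain ⟨hv0, hvN⟩ := hes e (by simp)
    have hes' : ∀ e' ∈ es, -(N : Int) ≤ e'.2 ∧ e'.2 < (N : Int) :=
      fun e' h => hes e' (List.mem_cons_of_mem _ h)
    have hvlt : pvIdx N e.2 < nxt.length := by
      rw [hlen]; exact pvIdx_lt N e.2 hvN (by omega)
    have hwlt : w < nxt.length := by omega
    have hset : pvUpdA x1 row nxt e = nxt.set (pvIdx N e.2)
        (if e.2 ≠ x1 then
          (PySem.Int.mod (nxt[pvIdx N e.2].1 + (row.getD e.1 (0, 0)).1) 998244353,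
           PySem.Int.mod (nxt[pvIdx N e.2].2 + (row.getD e.1 (0, 0)).2) 998244353)
        else
          (PySem.Int.mod (nxt[pvIdx N e.2].1 + (row.getD e.1 (0, 0)).2) 998244353,
           PySem.Int.mod (nxt[pvIdx N e.2].2 + (row.getD e.1 (0, 0)).1) 998244353)) := by
      simp only [pvUpdA]
      rw [pv_pySetD _ _ _ (by omega) (by omega), pv_pyGetD _ _ _ (by omega) (by omega), hlen,
        List.getD_eq_getElem _ _ (hlen ▸ hvlt)]
    have hlen' : (pvUpdA x1 row nxt e).length = N := by rw [hset]; simp [hlen]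
    have hih := ih hes' (pvUpdA x1 row nxt e) hlen' w hw
    rw [List.foldl_cons]
    have hgd : (pvUpdA x1 row nxt e).getD w (0, 0)
        = if pvIdx N e.2 = w then
          (if e.2 ≠ x1 then
            (PySem.Int.mod (nxt[pvIdx N e.2].1 + (row.getD e.1 (0, 0)).1) 998244353,
             PySem.Int.mod (nxt[pvIdx N e.2].2 + (row.getD e.1 (0, 0)).2) 998244353)
          else
            (PySem.Int.mod (nxt[pvIdx N e.2].1 + (row.getD e.1 (0, 0)).2) 998244353,
             PySem.Int.mod (nxt[pvIdx N e.2].2 + (row.getD e.1 (0, 0)).1) 998244353))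
          else nxt.getD w (0, 0) := by
      rw [hset, List.getD_eq_getElem _ _ (by simpa using hwlt), List.getElem_set]
      by_cases h : pvIdx N e.2 = w
      · rw [if_pos h, if_pos h]
      · rw [if_neg h, if_neg h, List.getD_eq_getElem _ _ hwlt]
    have hgetw : nxt.getD w (0, 0) = nxt[w] := List.getD_eq_getElem _ _ hwlt
    by_cases hw' : pvIdx N e.2 = w
    · rw [List.filter_cons_of_pos (by simpa using hw')]
      constructor
      · rw [hih.1, hgd, if_pos hw']
        simp only [hw', List.map_cons, List.sum_cons, pvF, hgetw]
        by_cases hx : e.2 ≠ x1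
        · rw [if_pos hx, if_pos hx]
          simp only [pv_castmod]
          push_cast
          ring
        · rw [if_neg hx, if_neg hx]
          simp only [pv_castmod]
          push_cast
          ring
      · rw [hih.2, hgd, if_pos hw']
        simp only [hw', List.map_cons, List.sum_cons, pvF, hgetw]
        by_cases hx : e.2 ≠ x1
        · rw [if_pos hx, if_pos hx]
          simp only [pv_castmod]
          push_cast
          ring
        · rw [if_neg hx, if_neg hx]
          simp only [pv_castmod]
          push_cast
          ring
    · rw [List.filter_cons_of_neg (by simpa using hw')]
      constructor
      · rw [hih.1, hgd, if_neg hw']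
      · rw [hih.2, hgd, if_neg hw']

-- (i, j) entry of a list-of-lists matrix, as an Int
def pvEntry (A : List (List Int)) (i j : ℕ) : Int := (A.getD i []).getD j 0

-- one edge's pair of 'mat[_][_] += 1' updates in B's matrix construction
def pvUpdB (x : Int) (mat : List (List Int)) (e : ℕ × Int) : List (List Int) :=
  if e.2 ≠ x - 1 then
    pvBump (pvBump mat (2 * e.2) (2 * (e.1 : Int))) (2 * e.2 + 1) (2 * (e.1 : Int) + 1)
  else
    pvBump (pvBump mat (2 * e.2) (2 * (e.1 : Int) + 1)) (2 * e.2 + 1) (2 * (e.1 : Int))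

theorem pvBuildMat_eq (n x : Int) (hn : 0 ≤ n) (graph : List (List Int)) :
    pvBuildMat n x graph = (pvEdges n.toNat graph).foldl (pvUpdB x)
      ((PySem.List.pyRange 0 (2 * n) 1).map (fun _ =>
        (PySem.List.pyRange 0 (2 * n) 1).map (fun _ => (0 : Int)))) := by
  unfold pvBuildMat pvEdges pvUpdB
  conv_lhs => rw [show n = ((n.toNat : ℕ) : Int) from (Int.toNat_of_nonneg hn).symm,
    PySem.List.pyRange_zero_natCast]
  rw [List.foldl_map, List.foldl_flatMap]
  simp only [List.foldl_map, PySem.List.pyGetD_natCast]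
  rw [show ((n.toNat : ℕ) : Int) = n from Int.toNat_of_nonneg hn]

theorem pv_getD_set {α : Type} (l : List α) (n : ℕ) (v : α) (m : ℕ) (d : α)
    (hn : n < l.length) :
    (l.set n v).getD m d = if m = n then v else l.getD m d := by
  by_cases hm : m < l.length
  · rw [List.getD_eq_getElem _ _ (by simpa using hm), List.getElem_set,
      List.getD_eq_getElem _ _ hm]
    by_cases h : m = n
    · simp [h]
    · simp [h, Ne.symm h]
  · have h1 : (l.set n v).length ≤ m := by simp; omega
    have h2 : l.length ≤ m := by omega
    rw [List.getD_eq_default _ _ h1, List.getD_eq_default _ _ h2]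
    have : ¬ m = n := by omega
    simp [this]

theorem pvBump_entry (mat : List (List Int)) (a b : ℕ)
    (ha : a < mat.length) (hb : b < (mat.getD a []).length) (i j : ℕ) :
    pvEntry (pvBump mat (a : Int) (b : Int)) i j
      = pvEntry mat i j + (if i = a ∧ j = b then 1 else 0) := by
  unfold pvBump pvEntry
  simp only [PySem.List.pyGetD_natCast, PySem.List.pySetD_natCast]
  rw [pv_getD_set _ _ _ _ _ ha]
  by_cases hia : i = a
  · rw [if_pos hia, pv_getD_set _ _ _ _ _ hb]
    by_cases hjb : j = b
    · simp [hia, hjb]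
    · simp [hia, hjb]
  · rw [if_neg hia]
    simp [hia]

theorem pvBump_length (mat : List (List Int)) (i j : Int) :
    (pvBump mat i j).length = mat.length := by
  unfold pvBump; simp [PySem.List.length_pySetD]

theorem pvBump_rows (mat : List (List Int)) (a : ℕ) (j : Int) (D : ℕ)
    (ha : a < mat.length) (hrows : ∀ r ∈ mat, r.length = D) :
    ∀ r ∈ pvBump mat (a : Int) j, r.length = D := by
  unfold pvBump
  simp only [PySem.List.pyGetD_natCast, PySem.List.pySetD_natCast]
  intro r hr
  rcases List.mem_or_eq_of_mem_set hr with h | h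
  · exact hrows r h
  · subst h
    rw [PySem.List.length_pySetD]
    have hmem : mat.getD a [] ∈ mat := by
      rw [List.getD_eq_getElem _ _ ha]; exact List.getElem_mem ha
    exact hrows _ hmem

theorem pvBump_norm (mat : List (List Int)) (i c : Int)
    (h0 : -(mat.length : Int) ≤ i) (h1 : i < mat.length) :
    pvBump mat i c = pvBump mat ((pvIdx mat.length i : ℕ) : Int) c := by
  unfold pvBump
  rw [pv_pyGetD _ _ _ h0 h1, pv_pySetD _ _ _ h0 h1, PySem.List.pyGetD_natCast,
    PySem.List.pySetD_natCast]

theorem pvIdx_double (N : ℕ) (i : Int) (h0 : -(N : Int) ≤ i) (h1 : i < N) :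
    pvIdx (2 * N) (2 * i) = 2 * pvIdx N i := by
  unfold pvIdx; split_ifs <;> omega

theorem pvIdx_double1 (N : ℕ) (i : Int) (h0 : -(N : Int) ≤ i) (h1 : i < N) :
    pvIdx (2 * N) (2 * i + 1) = 2 * pvIdx N i + 1 := by
  unfold pvIdx; split_ifs <;> omega

-- per-edge contribution to entry (i, j) of the transition matrix
def pvEnt (N : ℕ) (x : Int) (e : ℕ × Int) (i j : ℕ) : ZMod 998244353 :=
  (if i = 2 * pvIdx N e.2 ∧ j = (if e.2 ≠ x - 1 then 2 * e.1 else 2 * e.1 + 1) then 1 else 0)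
  + (if i = 2 * pvIdx N e.2 + 1 ∧ j = (if e.2 ≠ x - 1 then 2 * e.1 + 1 else 2 * e.1) then 1 else 0)

theorem pv_scatterB (x : Int) (N : ℕ) (es : List (ℕ × Int))
    (hes : ∀ e ∈ es, e.1 < N ∧ -(N : Int) ≤ e.2 ∧ e.2 < (N : Int)) :
    ∀ mat : List (List Int), mat.length = 2 * N → (∀ r ∈ mat, r.length = 2 * N) →
    ∀ i j : ℕ, i < 2 * N → j < 2 * N →
    ((pvEntry (es.foldl (pvUpdB x) mat) i j : Int) : ZMod 998244353)
      = ((pvEntry mat i j : Int) : ZMod 998244353) + (es.map (fun e => pvEnt N x e i j)).sum := by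
  induction es with
  | nil => simp
  | cons e es ih =>
    intro mat hlen hrows i j hi hj
    obtain ⟨hj1, hv0, hvN⟩ := hes e (by simp)
    have hes' : ∀ e' ∈ es, e'.1 < N ∧ -(N : Int) ≤ e'.2 ∧ e'.2 < (N : Int) :=
      fun e' h => hes e' (List.mem_cons_of_mem _ h)
    have hgdmem : ∀ (L : List (List Int)) (a : ℕ), a < L.length → L.getD a [] ∈ L :=
      fun L a h => by rw [List.getD_eq_getElem _ _ h]; exact List.getElem_mem h
    have castind : ∀ (P : Prop) (_ : Decidable P),
        ((if P then (1 : Int) else 0 : Int) : ZMod 998244353) = if P then 1 else 0 := by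
      intro P hP; split_ifs <;> simp
    have hvI : pvIdx N e.2 < N := pvIdx_lt N e.2 hvN (by omega)
    have hc1 : (2 * (e.1 : Int) : Int) = ((2 * e.1 : ℕ) : Int) := by push_cast; ring
    have hc2 : (2 * (e.1 : Int) + 1 : Int) = ((2 * e.1 + 1 : ℕ) : Int) := by push_cast; ring
    have haN : 2 * pvIdx N e.2 < mat.length := by omega
    have hrow0 : (mat.getD (2 * pvIdx N e.2) []).length = 2 * N := hrows _ (hgdmem _ _ haN)
    have hnorm0 : ∀ cc : Int, pvBump mat (2 * e.2) cc
        = pvBump mat ((2 * pvIdx N e.2 : ℕ) : Int) cc := by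
      intro cc
      rw [pvBump_norm mat (2 * e.2) cc (by omega) (by omega), hlen,
        pvIdx_double N e.2 hv0 hvN]
    have hnorm1 : ∀ (mm : List (List Int)) (cc : Int), mm.length = 2 * N →
        pvBump mm (2 * e.2 + 1) cc = pvBump mm ((2 * pvIdx N e.2 + 1 : ℕ) : Int) cc := by
      intro mm cc hmm
      rw [pvBump_norm mm (2 * e.2 + 1) cc (by omega) (by omega), hmm,
        pvIdx_double1 N e.2 hv0 hvN]
    rw [List.foldl_cons, List.map_cons, List.sum_cons]
    by_cases hx : e.2 ≠ x - 1
    · rw [show pvUpdB x mat e = pvBump (pvBump mat ((2 * pvIdx N e.2 : ℕ) : Int)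
          ((2 * e.1 : ℕ) : Int)) ((2 * pvIdx N e.2 + 1 : ℕ) : Int) ((2 * e.1 + 1 : ℕ) : Int) from by
        unfold pvUpdB
        rw [if_pos hx, hc2, hc1, hnorm0, hnorm1 _ _ (by rw [pvBump_length, hlen])]]
      have hm1len : (pvBump mat ((2 * pvIdx N e.2 : ℕ) : Int) ((2 * e.1 : ℕ) : Int)).length = 2 * N := by
        rw [pvBump_length, hlen]
      have hm1rows := pvBump_rows mat (2 * pvIdx N e.2) ((2 * e.1 : ℕ) : Int) (2 * N) haN hrows
      have hm2len : (pvBump (pvBump mat ((2 * pvIdx N e.2 : ℕ) : Int) ((2 * e.1 : ℕ) : Int))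
          ((2 * pvIdx N e.2 + 1 : ℕ) : Int) ((2 * e.1 + 1 : ℕ) : Int)).length = 2 * N := by
        rw [pvBump_length, hm1len]
      have hm2rows := pvBump_rows _ (2 * pvIdx N e.2 + 1) ((2 * e.1 + 1 : ℕ) : Int) (2 * N)
        (by omega) hm1rows
      rw [ih hes' _ hm2len hm2rows i j hi hj]
      rw [pvBump_entry _ _ _ (by omega) (by rw [hm1rows _ (hgdmem _ _ (by omega))]; omega)]
      rw [pvBump_entry _ _ _ haN (by rw [hrow0]; omega)]
      push_cast [castind]
      simp only [pvEnt, if_pos hx]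
      ring
    · rw [show pvUpdB x mat e = pvBump (pvBump mat ((2 * pvIdx N e.2 : ℕ) : Int)
          ((2 * e.1 + 1 : ℕ) : Int)) ((2 * pvIdx N e.2 + 1 : ℕ) : Int) ((2 * e.1 : ℕ) : Int) from by
        unfold pvUpdB
        rw [if_neg hx, hc2, hc1, hnorm0, hnorm1 _ _ (by rw [pvBump_length, hlen])]]
      have hm1len : (pvBump mat ((2 * pvIdx N e.2 : ℕ) : Int) ((2 * e.1 + 1 : ℕ) : Int)).length = 2 * N := by
        rw [pvBump_length, hlen]
      have hm1rows := pvBump_rows mat (2 * pvIdx N e.2) ((2 * e.1 + 1 : ℕ) : Int) (2 * N) haN hrows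
      have hm2len : (pvBump (pvBump mat ((2 * pvIdx N e.2 : ℕ) : Int) ((2 * e.1 + 1 : ℕ) : Int))
          ((2 * pvIdx N e.2 + 1 : ℕ) : Int) ((2 * e.1 : ℕ) : Int)).length = 2 * N := by
        rw [pvBump_length, hm1len]
      have hm2rows := pvBump_rows _ (2 * pvIdx N e.2 + 1) ((2 * e.1 : ℕ) : Int) (2 * N)
        (by omega) hm1rows
      rw [ih hes' _ hm2len hm2rows i j hi hj]
      rw [pvBump_entry _ _ _ (by omega) (by rw [hm1rows _ (hgdmem _ _ (by omega))]; omega)]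
      rw [pvBump_entry _ _ _ haN (by rw [hrow0]; omega)]
      push_cast [castind]
      simp only [pvEnt, if_neg hx]
      ring

-- small generic helpers ---------------------------------------------------

theorem pv_foldl_iter {α β : Type} (f : α → α) (l : List β) (a : α) :
    l.foldl (fun r _ => f r) a = f^[l.length] a := by
  induction l generalizing a with
  | nil => rfl
  | cons b l ih => rw [List.foldl_cons, ih, List.length_cons, Function.iterate_succ_apply]

theorem pv_cast_inj (a b : Int) (ha0 : 0 ≤ a) (ha1 : a < 998244353)
    (hb0 : 0 ≤ b) (hb1 : b < 998244353)
    (h : (a : ZMod 998244353) = (b : ZMod 998244353)) : a = b := by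
  have hmod := (ZMod.intCast_eq_intCast_iff a b 998244353).1 h
  have : a % (998244353 : Int) = b % (998244353 : Int) := hmod
  rwa [Int.emod_eq_of_lt ha0 (by exact_mod_cast ha1),
    Int.emod_eq_of_lt hb0 (by exact_mod_cast hb1)] at this

theorem pv_swap {Dn : ℕ} (l : List (ℕ × Int)) (g : ℕ × Int → Fin Dn → ZMod 998244353)
    (w : Fin Dn → ZMod 998244353) :
    (∑ j : Fin Dn, (l.map (fun e => g e j)).sum * w j)
      = (l.map (fun e => ∑ j : Fin Dn, g e j * w j)).sum := by
  induction l with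
  | nil => simp
  | cons e l ih => simp [add_mul, Finset.sum_add_distrib, ih]

theorem pv_filter_map_sum (l : List (ℕ × Int)) (p : ℕ × Int → Prop) [DecidablePred p]
    (g : ℕ × Int → ZMod 998244353) :
    ((l.filter (fun e => p e)).map g).sum = (l.map (fun e => if p e then g e else 0)).sum := by
  induction l with
  | nil => simp
  | cons e l ih =>
    by_cases h : p e
    · rw [List.filter_cons_of_pos (by simpa using h)]; simp [h, ih]
    · rw [List.filter_cons_of_neg (by simpa using h)]; simp [h, ih]

theorem pv_ind_sum (Dn : ℕ) (a b : ℕ) (hb : b < Dn)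
    (w : Fin Dn → ZMod 998244353) (i : Fin Dn) :
    (∑ j : Fin Dn, (if (i : ℕ) = a ∧ (j : ℕ) = b then (1 : ZMod 998244353) else 0) * w j)
      = if (i : ℕ) = a then w ⟨b, hb⟩ else 0 := by
  by_cases hia : (i : ℕ) = a
  · simp only [hia, true_and, if_pos rfl]
    calc (∑ j : Fin Dn, (if (j : ℕ) = b then (1 : ZMod 998244353) else 0) * w j)
        = ∑ j : Fin Dn, (if j = (⟨b, hb⟩ : Fin Dn) then w j else 0) := by
          apply Finset.sum_congr rfl; intro j _
          by_cases hj : (j : ℕ) = b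
          · have : j = (⟨b, hb⟩ : Fin Dn) := Fin.ext hj
            simp [hj, this]
          · have : ¬ j = (⟨b, hb⟩ : Fin Dn) := by simp [Fin.ext_iff, hj]
            simp [hj, this]
      _ = w ⟨b, hb⟩ := by simp
  · simp [hia]

theorem pv_mulvec_single (Dn : ℕ) (M : Matrix (Fin Dn) (Fin Dn) (ZMod 998244353))
    (jv i : Fin Dn) : (M.mulVec (Pi.single jv 1)) i = M i jv := by
  simp [Matrix.mulVec, dotProduct, Pi.single_apply, mul_ite]

-- bookkeeping about the ports -------------------------------------------

theorem pv_zeros_len (n : Int) : (pvZerosRow n).length = n.toNat := by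
  unfold pvZerosRow
  rw [List.length_map, PySem.List.length_pyRange_one]
  norm_num

theorem pv_zeros_getD (n : Int) (hn : 0 ≤ n) (w : ℕ) (hw : w < n.toNat) :
    (pvZerosRow n).getD w (0, 0) = (0, 0) := by
  unfold pvZerosRow
  rw [show n = ((n.toNat : ℕ) : Int) from (Int.toNat_of_nonneg hn).symm,
    PySem.List.pyRange_zero_natCast, List.map_map,
    PySem.List.getD_map_range _ _ _ _ hw]
  rfl

theorem pv_zerosmat_entry (n : Int) (i j : ℕ)
    (hi : i < (2 * n).toNat) :
    pvEntry ((PySem.List.pyRange 0 (2 * n) 1).map (fun _ =>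
      (PySem.List.pyRange 0 (2 * n) 1).map (fun _ => (0 : Int)))) i j = 0 := by
  unfold pvEntry
  rw [show (2 * n : Int) = (((2 * n).toNat : ℕ) : Int) from by omega,
    PySem.List.pyRange_zero_natCast, List.map_map,
    PySem.List.getD_map_range _ _ _ _ hi]
  simp only [Function.comp_apply]
  by_cases hj : j < (2 * n).toNat
  · rw [List.map_map, PySem.List.getD_map_range _ _ _ _ hj]; rfl
  · rw [List.getD_eq_default]
    rw [List.length_map, List.length_map, List.length_range]
    omega

theorem pv_zerosmat_len (n : Int) (hn : 0 ≤ n) :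
    ((PySem.List.pyRange 0 (2 * n) 1).map (fun _ =>
      (PySem.List.pyRange 0 (2 * n) 1).map (fun _ => (0 : Int)))).length = 2 * n.toNat := by
  rw [List.length_map, PySem.List.length_pyRange_one]; omega

theorem pv_zerosmat_rows (n : Int) (hn : 0 ≤ n) :
    ∀ r ∈ ((PySem.List.pyRange 0 (2 * n) 1).map (fun _ =>
      (PySem.List.pyRange 0 (2 * n) 1).map (fun _ => (0 : Int)))), r.length = 2 * n.toNat := by
  intro r hr
  rw [List.mem_map] at hr
  obtain ⟨_, _, rfl⟩ := hr
  rw [List.length_map, PySem.List.length_pyRange_one]; omega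

theorem pv_edges_bound (n : Int) (graph : List (List Int)) (hn : 1 ≤ n)
    (hlen : n.toNat ≤ graph.length)
    (hg : ∀ row ∈ graph.take n.toNat, ∀ v ∈ row, -n ≤ v ∧ v < n) :
    ∀ e ∈ pvEdges n.toNat graph, e.1 < n.toNat ∧ -(n.toNat : Int) ≤ e.2 ∧ e.2 < (n.toNat : Int) := by
  intro e he
  unfold pvEdges at he
  rw [List.mem_flatMap] at he
  obtain ⟨j, hj, hm⟩ := he
  rw [List.mem_range] at hj
  rw [List.mem_map] at hm
  obtain ⟨v, hv, rfl⟩ := hm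
  have hjlen : j < graph.length := by omega
  have hjtake : j < (graph.take n.toNat).length := by simp; omega
  have hrowmem : graph.getD j [] ∈ graph.take n.toNat := by
    rw [List.getD_eq_getElem _ _ hjlen]
    have heq : (graph.take n.toNat)[j]'hjtake = graph[j]'hjlen := List.getElem_take
    rw [← heq]
    exact List.getElem_mem hjtake
  have hb := hg _ hrowmem v hv
  have hcast : (n.toNat : Int) = n := Int.toNat_of_nonneg (by omega)
  exact ⟨hj, by omega, by omega⟩

theorem pv_foldA_len (x1 : Int) (row : List (Int × Int)) (es : List (ℕ × Int)) :
    ∀ nxt, (es.foldl (pvUpdA x1 row) nxt).length = nxt.length := by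
  induction es with
  | nil => intro _; rfl
  | cons e es ih =>
    intro nxt
    rw [List.foldl_cons, ih]
    simp only [pvUpdA]
    rw [PySem.List.length_pySetD]

theorem pv_stepA_len (n x1 : Int) (hn : 0 ≤ n) (graph : List (List Int))
    (row : List (Int × Int)) : (pvStepA n x1 graph row).length = n.toNat := by
  rw [pvStepA_eq n x1 hn, pv_foldA_len, pv_zeros_len]

theorem pv_mod_bounds (a : Int) :
    0 ≤ PySem.Int.mod a 998244353 ∧ PySem.Int.mod a 998244353 < 998244353 := by
  rw [PySem.Int.mod_eq_emod_of_pos (by norm_num)]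
  exact ⟨Int.emod_nonneg a (by norm_num), Int.emod_lt_of_pos a (by norm_num)⟩

theorem pv_foldA_bounds (x1 : Int) (row : List (Int × Int)) (es : List (ℕ × Int)) :
    ∀ nxt, (∀ q ∈ nxt, 0 ≤ q.1 ∧ q.1 < 998244353 ∧ 0 ≤ q.2 ∧ q.2 < 998244353) →
      ∀ q ∈ es.foldl (pvUpdA x1 row) nxt,
        0 ≤ q.1 ∧ q.1 < 998244353 ∧ 0 ≤ q.2 ∧ q.2 < 998244353 := by
  induction es with
  | nil => intro nxt h; simpa using h
  | cons e es ih =>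
    intro nxt h
    rw [List.foldl_cons]
    refine ih _ ?_
    intro q hq
    simp only [pvUpdA] at hq
    rcases pv_mem_pySetD q _ _ _ hq with hmem | heq
    · exact h q hmem
    · subst heq
      constructor
      · split_ifs <;> exact (pv_mod_bounds _).1
      constructor
      · split_ifs <;> exact (pv_mod_bounds _).2
      constructor
      · split_ifs <;> exact (pv_mod_bounds _).1
      · split_ifs <;> exact (pv_mod_bounds _).2

theorem pv_stepA_bounds (n x1 : Int) (hn : 0 ≤ n) (graph : List (List Int))
    (row : List (Int × Int)) :
    ∀ q ∈ pvStepA n x1 graph row,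
      0 ≤ q.1 ∧ q.1 < 998244353 ∧ 0 ≤ q.2 ∧ q.2 < 998244353 := by
  rw [pvStepA_eq n x1 hn]
  refine pv_foldA_bounds x1 row _ _ ?_
  intro q hq
  unfold pvZerosRow at hq
  rw [List.mem_map] at hq
  obtain ⟨_, _, rfl⟩ := hq
  norm_num

-- reading the vector at even/odd positions
theorem pvV_even (N : ℕ) (row : List (Int × Int)) (a : ℕ) (h : 2 * a < 2 * N) :
    pvV (2 * N) row ⟨2 * a, h⟩ = (((row.getD a (0, 0)).1 : Int) : ZMod 998244353) := by
  have h1 : (2 * a) % 2 = 0 := by omega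
  have h2 : (2 * a) / 2 = a := by omega
  simp [pvV, h1, h2]

theorem pvV_odd (N : ℕ) (row : List (Int × Int)) (a : ℕ) (h : 2 * a + 1 < 2 * N) :
    pvV (2 * N) row ⟨2 * a + 1, h⟩ = (((row.getD a (0, 0)).2 : Int) : ZMod 998244353) := by
  have h1 : ¬ ((2 * a + 1) % 2 = 0) := by omega
  have h2 : (2 * a + 1) / 2 = a := by omega
  simp [pvV, h1, h2]

-- a single edge's column action on the state vector
theorem pv_ent_mulvec (N : ℕ) (x : Int) (e : ℕ × Int) (he1 : e.1 < N)
    (he2 : -(N : Int) ≤ e.2) (he3 : e.2 < (N : Int)) (row : List (Int × Int))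
    (i : Fin (2 * N)) :
    (∑ j : Fin (2 * N), pvEnt N x e (i : ℕ) (j : ℕ) * pvV (2 * N) row j)
      = if pvIdx N e.2 = (i : ℕ) / 2
        then pvF (x - 1) row ((i : ℕ) % 2) e.2 e.1 else 0 := by
  have hc0 : 2 * e.1 < 2 * N := by omega
  have hc1 : 2 * e.1 + 1 < 2 * N := by omega
  have hvI : pvIdx N e.2 < N := pvIdx_lt N e.2 he3 (by omega)
  by_cases hx : e.2 ≠ x - 1
  · simp only [pvEnt, if_pos hx]
    simp only [add_mul, Finset.sum_add_distrib]
    rw [pv_ind_sum _ _ _ hc0, pv_ind_sum _ _ _ hc1, pvV_even N row e.1 hc0,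
      pvV_odd N row e.1 hc1]
    by_cases hi1 : (i : ℕ) = 2 * pvIdx N e.2
    · have hm : (i : ℕ) % 2 = 0 := by omega
      have hcond : pvIdx N e.2 = (i : ℕ) / 2 := by omega
      have hni : ¬ ((i : ℕ) = 2 * pvIdx N e.2 + 1) := by omega
      rw [if_pos hi1, if_neg hni, if_pos hcond, add_zero]
      simp only [pvF]
      rw [if_pos hx, if_pos hm]
    · by_cases hi2 : (i : ℕ) = 2 * pvIdx N e.2 + 1
      · have hm : ¬ ((i : ℕ) % 2 = 0) := by omega
        have hcond : pvIdx N e.2 = (i : ℕ) / 2 := by omega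
        rw [if_neg hi1, if_pos hi2, zero_add, if_pos hcond]
        simp only [pvF]
        rw [if_pos hx, if_neg hm]
      · have hcond : ¬ (pvIdx N e.2 = (i : ℕ) / 2) := by omega
        rw [if_neg hi1, if_neg hi2, if_neg hcond, add_zero]
  · have hxn : ¬ (e.2 ≠ x - 1) := hx
    simp only [pvEnt, if_neg hxn]
    simp only [add_mul, Finset.sum_add_distrib]
    rw [pv_ind_sum _ _ _ hc1, pv_ind_sum _ _ _ hc0, pvV_even N row e.1 hc0,
      pvV_odd N row e.1 hc1]
    by_cases hi1 : (i : ℕ) = 2 * pvIdx N e.2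
    · have hm : (i : ℕ) % 2 = 0 := by omega
      have hcond : pvIdx N e.2 = (i : ℕ) / 2 := by omega
      have hni : ¬ ((i : ℕ) = 2 * pvIdx N e.2 + 1) := by omega
      rw [if_pos hi1, if_neg hni, if_pos hcond, add_zero]
      simp only [pvF]
      rw [if_neg hxn, if_pos hm]
    · by_cases hi2 : (i : ℕ) = 2 * pvIdx N e.2 + 1
      · have hm : ¬ ((i : ℕ) % 2 = 0) := by omega
        have hcond : pvIdx N e.2 = (i : ℕ) / 2 := by omega
        rw [if_neg hi1, if_pos hi2, zero_add, if_pos hcond]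
        simp only [pvF]
        rw [if_neg hxn, if_neg hm]
      · have hcond : ¬ (pvIdx N e.2 = (i : ℕ) / 2) := by omega
        rw [if_neg hi1, if_neg hi2, if_neg hcond, add_zero]

-- one DP step of A is multiplication by B's transition matrix
theorem pv_step_mat (n x : Int) (graph : List (List Int)) (hn : 1 ≤ n)
    (hlen : n.toNat ≤ graph.length)
    (hg : ∀ row ∈ graph.take n.toNat, ∀ v ∈ row, -n ≤ v ∧ v < n)
    (row : List (Int × Int)) :
    pvV (2 * n.toNat) (pvStepA n (x - 1) graph row)
      = (pvM (2 * n.toNat) (pvBuildMat n x graph)).mulVec (pvV (2 * n.toNat) row) := by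
  funext i
  have hbound := pv_edges_bound n graph hn hlen hg
  have hzlen : (pvZerosRow n).length = n.toNat := pv_zeros_len n
  have hw2 : (i : ℕ) / 2 < n.toNat := by have := i.isLt; omega
  have hsc := pv_scatterA (x - 1) row n.toNat (pvEdges n.toNat graph)
    (fun e he => (hbound e he).2) (pvZerosRow n) hzlen ((i : ℕ) / 2) hw2
  -- the matrix entries
  have hMent : ∀ j : Fin (2 * n.toNat), pvM (2 * n.toNat) (pvBuildMat n x graph) i j
      = ((pvEdges n.toNat graph).map (fun e => pvEnt n.toNat x e (i : ℕ) (j : ℕ))).sum := by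
    intro j
    have hsb := pv_scatterB x n.toNat (pvEdges n.toNat graph) hbound
      ((PySem.List.pyRange 0 (2 * n) 1).map (fun _ =>
        (PySem.List.pyRange 0 (2 * n) 1).map (fun _ => (0 : Int))))
      (pv_zerosmat_len n (by omega)) (pv_zerosmat_rows n (by omega))
      (i : ℕ) (j : ℕ) i.isLt j.isLt
    have : pvM (2 * n.toNat) (pvBuildMat n x graph) i j
        = ((pvEntry (pvBuildMat n x graph) (i : ℕ) (j : ℕ) : Int) : ZMod 998244353) := rfl
    rw [this, pvBuildMat_eq n x (by omega), hsb, pv_zerosmat_entry n _ _ (by omega)]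
    simp
  -- right-hand side
  rw [Matrix.mulVec]
  show _ = ∑ j, pvM (2 * n.toNat) (pvBuildMat n x graph) i j * pvV (2 * n.toNat) row j
  rw [Finset.sum_congr rfl (fun j _ => by rw [hMent j]), pv_swap,
    List.map_congr_left (fun e he => pv_ent_mulvec n.toNat x e (hbound e he).1
      (hbound e he).2.1 (hbound e he).2.2 row i)]
  -- left-hand side
  rw [pvStepA_eq n (x - 1) (by omega)]
  have hz := pv_zeros_getD n (by omega) ((i : ℕ) / 2) hw2
  rw [hz] at hsc
  have hfm := pv_filter_map_sum (pvEdges n.toNat graph)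
    (fun e => pvIdx n.toNat e.2 = (i : ℕ) / 2)
    (fun e => pvF (x - 1) row ((i : ℕ) % 2) e.2 e.1)
  by_cases hpar : (i : ℕ) % 2 = 0
  · have hL : pvV (2 * n.toNat)
        ((pvEdges n.toNat graph).foldl (pvUpdA (x - 1) row) (pvZerosRow n)) i
        = (((((pvEdges n.toNat graph).foldl (pvUpdA (x - 1) row)
            (pvZerosRow n)).getD ((i : ℕ) / 2) (0, 0)).1 : Int) : ZMod 998244353) := by
      simp [pvV, hpar]
    rw [hL, hsc.1]
    simp only [Prod.fst_zero, Int.cast_zero, zero_add]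
    simp only [hpar] at hfm ⊢
    exact hfm
  · have hL : pvV (2 * n.toNat)
        ((pvEdges n.toNat graph).foldl (pvUpdA (x - 1) row) (pvZerosRow n)) i
        = (((((pvEdges n.toNat graph).foldl (pvUpdA (x - 1) row)
            (pvZerosRow n)).getD ((i : ℕ) / 2) (0, 0)).2 : Int) : ZMod 998244353) := by
      simp [pvV, hpar]
    rw [hL, hsc.2]
    simp only [Prod.snd_zero, Int.cast_zero, zero_add]
    have h1 : (i : ℕ) % 2 = 1 := by omega
    simp only [h1] at hfm ⊢
    exact hfm

theorem pv_iter_mat (n x : Int) (graph : List (List Int)) (hn : 1 ≤ n)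
    (hlen : n.toNat ≤ graph.length)
    (hg : ∀ row ∈ graph.take n.toNat, ∀ v ∈ row, -n ≤ v ∧ v < n)
    (row0 : List (Int × Int)) (c : ℕ) :
    pvV (2 * n.toNat) ((fun r => pvStepA n (x - 1) graph r)^[c] row0)
      = ((pvM (2 * n.toNat) (pvBuildMat n x graph)) ^ c).mulVec
          (pvV (2 * n.toNat) row0) := by
  induction c with
  | zero => simp [Matrix.one_mulVec]
  | succ c ih =>
    rw [Function.iterate_succ_apply', pv_step_mat n x graph hn hlen hg _, ih,
      Matrix.mulVec_mulVec, ← pow_succ']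

theorem pv_row0_single (n s : Int) (hn : 1 ≤ n) (hs1 : 1 - n ≤ s) (hs2 : s ≤ n)
    (h2 : 2 * pvIdx n.toNat (s - 1) < 2 * n.toNat) :
    pvV (2 * n.toNat) (PySem.List.pySetD (pvZerosRow n) (s - 1) (1, 0))
      = Pi.single (⟨2 * pvIdx n.toNat (s - 1), h2⟩ : Fin (2 * n.toNat)) 1 := by
  funext i
  rw [pv_pySetD _ _ _ (by rw [pv_zeros_len]; omega) (by rw [pv_zeros_len]; omega),
    pv_zeros_len]
  have hset := pv_getD_set (pvZerosRow n) (pvIdx n.toNat (s - 1)) ((1 : Int), (0 : Int))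
    ((i : ℕ) / 2) (0, 0) (by rw [pv_zeros_len]; omega)
  simp only [pvV, hset]
  by_cases hi : (i : ℕ) = 2 * pvIdx n.toNat (s - 1)
  · have hm : (i : ℕ) % 2 = 0 := by omega
    have hd : (i : ℕ) / 2 = pvIdx n.toNat (s - 1) := by omega
    have hieq : i = ⟨2 * pvIdx n.toNat (s - 1), h2⟩ := Fin.ext hi
    rw [if_pos hm, if_pos hd, hieq, Pi.single_eq_same]
    norm_num
  · have hne : ¬ i = (⟨2 * pvIdx n.toNat (s - 1), h2⟩ : Fin (2 * n.toNat)) := by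
      intro h; exact hi (congrArg Fin.val h)
    rw [Pi.single_eq_of_ne hne]
    by_cases hd : (i : ℕ) / 2 = pvIdx n.toNat (s - 1)
    · have hm : ¬ ((i : ℕ) % 2 = 0) := by omega
      rw [if_neg hm, if_pos hd]
      norm_num
    · rw [if_neg hd, pv_zeros_getD n (by omega) _ (by have := i.isLt; omega)]
      split_ifs <;> norm_num

-- shapes of B's matrices
theorem pv_idm_len (D : ℕ) : ((PySem.List.pyRange 0 (D : Int) 1).map (fun i =>
    (PySem.List.pyRange 0 (D : Int) 1).map (fun j => if i = j then (1 : Int) else 0))).length = D := by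
  rw [List.length_map, PySem.List.length_pyRange_one]; norm_num

theorem pv_idm_rows (D : ℕ) : ∀ r ∈ ((PySem.List.pyRange 0 (D : Int) 1).map (fun i =>
    (PySem.List.pyRange 0 (D : Int) 1).map (fun j => if i = j then (1 : Int) else 0))),
    r.length = D := by
  intro r hr
  rw [List.mem_map] at hr
  obtain ⟨_, _, rfl⟩ := hr
  rw [List.length_map, PySem.List.length_pyRange_one]; norm_num

theorem pv_mul_len (D : ℕ) (A B : List (List Int)) : (pvMul (D : Int) A B).length = D := by
  unfold pvMul
  rw [List.length_map, PySem.List.length_pyRange_one]; norm_num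

theorem pv_mul_rows (D : ℕ) (A B : List (List Int)) :
    ∀ r ∈ pvMul (D : Int) A B, r.length = D := by
  intro r hr
  unfold pvMul at hr
  rw [List.mem_map] at hr
  obtain ⟨_, _, rfl⟩ := hr
  rw [List.length_map, PySem.List.length_pyRange_one]; norm_num

theorem pv_pow_shape (D : ℕ) (e : ℕ) (R P : List (List Int)) (hR : R.length = D)
    (hRr : ∀ r ∈ R, r.length = D) :
    (pvPow (D : Int) R P e).length = D ∧ ∀ r ∈ pvPow (D : Int) R P e, r.length = D := by
  induction e using Nat.strong_induction_on generalizing R P with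
  | _ e ih =>
    by_cases he : e = 0
    · subst he
      rw [pvPow]
      simp only [if_pos rfl]
      exact ⟨hR, hRr⟩
    · rw [pvPow, if_neg he]
      by_cases hodd : e % 2 = 1
      · rw [if_pos hodd]
        exact ih (e / 2) (by omega) _ _ (pv_mul_len _ _ _) (pv_mul_rows _ _ _)
      · rw [if_neg hodd]
        exact ih (e / 2) (by omega) _ _ hR hRr

-- ===== VERDICT (by name: the statement is the Claim_ definition above) =====
theorem solve_spec : Claim_equal_solve := by
  intro n m k s t x graph _ hpre
  obtain ⟨hn, hk, hs1, hs2, ht1, ht2, hgg⟩ := hpre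
  unfold Spec_solve
  have htI : pvIdx n.toNat (t - 1) < n.toNat := pvIdx_lt _ _ (by omega) (by omega)
  have hsI : pvIdx n.toNat (s - 1) < n.toNat := pvIdx_lt _ _ (by omega) (by omega)
  have ht2N : 2 * pvIdx n.toNat (t - 1) < 2 * n.toNat := by omega
  have hs2N : 2 * pvIdx n.toNat (s - 1) < 2 * n.toNat := by omega
  simp only [solve, solve_alt]
  set row0 := PySem.List.pySetD (pvZerosRow n) (s - 1) ((1 : Int), (0 : Int)) with hrow0
  have hfold : (PySem.List.pyRange 0 k 1).foldl
      (fun row _ => pvStepA n (x - 1) graph row) row0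
      = (fun r => pvStepA n (x - 1) graph r)^[k.toNat] row0 := by
    rw [pv_foldl_iter, PySem.List.length_pyRange_one, Int.sub_zero]
  rw [hfold]
  set fin := (fun r => pvStepA n (x - 1) graph r)^[k.toNat] row0 with hfin
  have hfinlen : fin.length = n.toNat := by
    cases hc : k.toNat with
    | zero =>
      rw [hfin, hc, Function.iterate_zero_apply, hrow0, PySem.List.length_pySetD,
        pv_zeros_len]
    | succ c =>
      rw [hfin, hc, Function.iterate_succ_apply']
      exact pv_stepA_len n (x - 1) (by omega) graph _
  -- A side: resolve the (possibly negative) index t - 1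
  rw [pv_pyGetD fin (t - 1) (0, 0) (by rw [hfinlen]; omega) (by rw [hfinlen]; omega),
    hfinlen]
  -- B side: fix the dimension argument and resolve the indices
  rw [show (2 * n : Int) = ((2 * n.toNat : ℕ) : Int) from by omega]
  rw [show (if 0 < k then pvPow ((2 * n.toNat : ℕ) : Int)
      ((PySem.List.pyRange 0 ((2 * n.toNat : ℕ) : Int) 1).map (fun i =>
        (PySem.List.pyRange 0 ((2 * n.toNat : ℕ) : Int) 1).map (fun j =>
          if i = j then (1 : Int) else 0)))
      (pvBuildMat n x graph) k.toNat
    else ((PySem.List.pyRange 0 ((2 * n.toNat : ℕ) : Int) 1).map (fun i =>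
        (PySem.List.pyRange 0 ((2 * n.toNat : ℕ) : Int) 1).map (fun j =>
          if i = j then (1 : Int) else 0))))
      = pvPow ((2 * n.toNat : ℕ) : Int)
        ((PySem.List.pyRange 0 ((2 * n.toNat : ℕ) : Int) 1).map (fun i =>
          (PySem.List.pyRange 0 ((2 * n.toNat : ℕ) : Int) 1).map (fun j =>
            if i = j then (1 : Int) else 0)))
        (pvBuildMat n x graph) k.toNat from by
    by_cases h : 0 < k
    · rw [if_pos h]
    · rw [if_neg h, show k.toNat = 0 from by omega, pvPow]
      simp]
  set rmat := pvPow ((2 * n.toNat : ℕ) : Int)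
    ((PySem.List.pyRange 0 ((2 * n.toNat : ℕ) : Int) 1).map (fun i =>
      (PySem.List.pyRange 0 ((2 * n.toNat : ℕ) : Int) 1).map (fun j =>
        if i = j then (1 : Int) else 0)))
    (pvBuildMat n x graph) k.toNat with hrmat
  have hrshape := pv_pow_shape (2 * n.toNat) k.toNat _ (pvBuildMat n x graph)
    (pv_idm_len (2 * n.toNat)) (pv_idm_rows (2 * n.toNat))
  rw [← hrmat] at hrshape
  rw [pv_pyGetD rmat (2 * (t - 1)) [] (by rw [hrshape.1]; omega)
      (by rw [hrshape.1]; omega), hrshape.1,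
    pvIdx_double n.toNat (t - 1) (by omega) (by omega)]
  have hrowmem : rmat.getD (2 * pvIdx n.toNat (t - 1)) [] ∈ rmat := by
    rw [List.getD_eq_getElem _ _ (by rw [hrshape.1]; omega)]
    exact List.getElem_mem _
  have hrowlen : (rmat.getD (2 * pvIdx n.toNat (t - 1)) []).length = 2 * n.toNat :=
    hrshape.2 _ hrowmem
  rw [pv_pyGetD _ (2 * (s - 1)) 0 (by rw [hrowlen]; omega) (by rw [hrowlen]; omega),
    hrowlen, pvIdx_double n.toNat (s - 1) (by omega) (by omega)]
  have hall : ∀ q ∈ fin, 0 ≤ q.1 ∧ q.1 < 998244353 ∧ 0 ≤ q.2 ∧ q.2 < 998244353 := by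
    rw [hfin]
    cases hc : k.toNat with
    | zero =>
      rw [Function.iterate_zero_apply, hrow0]
      intro q hq
      rcases pv_mem_pySetD q _ _ _ hq with h | h
      · unfold pvZerosRow at h
        rw [List.mem_map] at h
        obtain ⟨_, _, heq⟩ := h
        rw [← heq]; norm_num
      · rw [h]; norm_num
    | succ c =>
      rw [Function.iterate_succ_apply']
      exact pv_stepA_bounds n (x - 1) (by omega) graph _
  have hmem : fin.getD (pvIdx n.toNat (t - 1)) (0, 0) ∈ fin := by
    rw [List.getD_eq_getElem _ _ (by rw [hfinlen]; omega)]
    exact List.getElem_mem _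
  refine pv_cast_inj _ _ ?_ ?_ ?_ ?_ ?_
  · exact (hall _ hmem).1
  · exact (hall _ hmem).2.1
  · exact (pv_mod_bounds _).1
  · exact (pv_mod_bounds _).2
  · -- casts agree
    rcases hgg with hk0 | ⟨hglen, hg⟩
    · -- k = 0: both sides are the (t, s) entry of the identity
      have hzero : k.toNat = 0 := by omega
      have hfin0 : fin = row0 := by rw [hfin, hzero, Function.iterate_zero_apply]
      rw [← pvV_even n.toNat fin (pvIdx n.toNat (t - 1)) ht2N, hfin0, hrow0,
        pv_row0_single n s hn hs1 hs2 hs2N, pv_castmod]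
      symm
      show pvM (2 * n.toNat) rmat
        ⟨2 * pvIdx n.toNat (t - 1), ht2N⟩ ⟨2 * pvIdx n.toNat (s - 1), hs2N⟩ = _
      rw [hrmat, hzero, pvPow]
      simp only [if_true, reduceIte]
      rw [pv_idM, Matrix.one_apply]
      simp [Pi.single_apply]
    · have hcast_a : (((fin.getD (pvIdx n.toNat (t - 1)) (0, 0)).1 : Int) : ZMod 998244353)
          = ((pvM (2 * n.toNat) (pvBuildMat n x graph)) ^ k.toNat)
              ⟨2 * pvIdx n.toNat (t - 1), ht2N⟩ ⟨2 * pvIdx n.toNat (s - 1), hs2N⟩ := by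
        rw [← pvV_even n.toNat fin (pvIdx n.toNat (t - 1)) ht2N, hfin,
          pv_iter_mat n x graph hn hglen hg row0 k.toNat, hrow0,
          pv_row0_single n s hn hs1 hs2 hs2N, pv_mulvec_single]
      rw [hcast_a, pv_castmod]
      symm
      show pvM (2 * n.toNat) rmat
        ⟨2 * pvIdx n.toNat (t - 1), ht2N⟩ ⟨2 * pvIdx n.toNat (s - 1), hs2N⟩ = _
      rw [hrmat, pv_powM, pv_idM, one_mul]
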